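-- pv_equiv track=rewrite | github.com/GMoylan02/short_video_generator | title_card.py | split_title
-- ===== SOURCE A (Python) =====
-- TITLE_CUTOFF = 130
--
-- DEFAULT_FONT_SIZE = 18
--
-- DEFAULT_WORDS_PER_LINE = 42
--
-- def split_title(title):
--     line_list = []
--     word_list = title.split(" ")
--     running_total = 0
--     line = ""
--     max_line_length = get_line_length(title)
--     for word in word_list:
--         if running_total >= max_line_length:
--             running_total = 0
--             line_list.append(line)
--             line = ""
--         line += word + " "
--         running_total += len(word) + 1
--     line_list.append(line)
--     return line_list
--
-- def get_font_size(title):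
--     if len(title) > TITLE_CUTOFF:
--         return int(18 * 130/len(title))
--     else:
--         return DEFAULT_FONT_SIZE
--
-- def get_line_length(title):
--     if len(title) > TITLE_CUTOFF:
--         return int(42 * 18/get_font_size(title))
--     else:
--         return DEFAULT_WORDS_PER_LINE
-- ===== SOURCE B (Python) =====
-- TITLE_CUTOFF = 130
--
-- DEFAULT_FONT_SIZE = 18
--
-- DEFAULT_WORDS_PER_LINE = 42
--
--
-- def split_title(title):
--     n = len(title)
--     if n > TITLE_CUTOFF:
--         max_line_length = int(DEFAULT_WORDS_PER_LINE * DEFAULT_FONT_SIZE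
--                               / int(DEFAULT_FONT_SIZE * TITLE_CUTOFF / n))
--     else:
--         max_line_length = DEFAULT_WORDS_PER_LINE
--
--     def first_line(words, total):
--         # peel off the greedy first line: words are taken while the running
--         # total (checked before each word) is still below the budget
--         if not words or total >= max_line_length:
--             return "", words
--         rest_line, rest = first_line(words[1:], total + len(words[0]) + 1)
--         return words[0] + " " + rest_line, rest
--
--     lines = []
--     words = title.split(" ")
--     while True:
--         line, words = first_line(words, 0)
--         lines.append(line)
--         if not words:
--             return lines
-- ===== Notes on version B (the rewrite author's own statement) =====
-- stated objective: alternative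
-- what changed: A builds all lines in one flush-as-you-go fold over the words with a (lines, running_total, current_line) state; B is a recursive first-line/rest decomposition: a helper peels off the greedy first line and the remaining words, and an outer loop repeatedly applies it until the words are exhausted.
import Mathlib
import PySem

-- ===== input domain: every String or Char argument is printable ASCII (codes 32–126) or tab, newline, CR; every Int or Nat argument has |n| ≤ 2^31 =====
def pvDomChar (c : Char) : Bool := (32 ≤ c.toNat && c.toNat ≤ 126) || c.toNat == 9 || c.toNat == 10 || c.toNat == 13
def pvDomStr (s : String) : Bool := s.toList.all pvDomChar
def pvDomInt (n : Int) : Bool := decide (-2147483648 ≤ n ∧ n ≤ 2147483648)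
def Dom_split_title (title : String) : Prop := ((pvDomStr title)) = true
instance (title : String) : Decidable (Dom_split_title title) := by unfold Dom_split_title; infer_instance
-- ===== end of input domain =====

-- B peels the title apart line by line (a recursive first-line/rest decomposition)
-- instead of A's single flush-as-you-go fold; equivalent on every title A returns on
-- (Pre_ excludes titles longer than 2340 chars, where A raises ZeroDivisionError).

-- ===== PORT A =====
-- int(18*130/len(title)): both operands positive and small, so CPython's float
-- true division followed by int() truncation equals floor division exactly here.
def get_font_size (title : String) : Int :=
  if PySem.Str.len title > 130 then
    PySem.Int.floordiv (18 * 130) (PySem.Str.len title)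
  else 18

-- int(42*18/get_font_size(title)): exact as floor division for the same reason;
-- get_font_size = 0 (title longer than 2340 chars) is Python's ZeroDivisionError,
-- excluded by Pre_split_title.
def get_line_length (title : String) : Int :=
  if PySem.Str.len title > 130 then
    PySem.Int.floordiv (42 * 18) (get_font_size title)
  else 42

-- title.split(" "): the separator is the literal " " ≠ "", so split? is `some`.
-- A's for-loop, ported as the structural recursion over the word list carrying
-- the same state (line_list, running_total, line):
def split_title_loop (m : Int) : List String → List String × Int × List Char → List String × Int × List Char
  | [], st => st
  | word :: rest, st =>
      let st' :=
        if st.2.1 ≥ m then (st.1 ++ [String.ofList st.2.2], (0 : Int), ([] : List Char))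
        else st
      split_title_loop m rest (st'.1, st'.2.1 + PySem.Str.len word + 1, st'.2.2 ++ word.toList ++ [' '])

def split_title (title : String) : List String :=
  let word_list := (PySem.Str.split? title " ").getD []
  let max_line_length := get_line_length title
  let st := split_title_loop max_line_length word_list ([], 0, [])
  st.1 ++ [String.ofList st.2.2]

-- ===== PORT B =====
-- first_line(words, total): the greedy first line (with its trailing spaces) and the rest
def first_line_alt (m : Int) : List String → Int → List Char × List String
  | [], _ => ([], [])
  | w :: ws, total =>
      if total ≥ m then ([], w :: ws)
      else
        let r := first_line_alt m ws (total + PySem.Str.len w + 1)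
        (w.toList ++ ' ' :: r.1, r.2)

-- the `while True` loop of B; fuel = number of remaining words bounds the iterations
def lines_alt (m : Int) : Nat → List String → List String
  | 0, _ => []
  | fuel + 1, words =>
      let r := first_line_alt m words 0
      if r.2.isEmpty then [String.ofList r.1]
      else String.ofList r.1 :: lines_alt m fuel r.2

def split_title_alt (title : String) : List String :=
  let n := PySem.Str.len title
  let max_line_length :=
    if n > 130 then PySem.Int.floordiv (42 * 18) (PySem.Int.floordiv (18 * 130) n)
    else 42
  let words := (PySem.Str.split? title " ").getD []
  lines_alt max_line_length words.length words

-- ===== PRECONDITION & SPEC =====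
-- Pre_ excludes exactly the titles of more than 2340 characters: there
-- get_font_size is 0 and Python's A raises ZeroDivisionError (returns nothing).
def Pre_split_title (title : String) : Prop := PySem.Str.len title ≤ 2340
instance (title : String) : Decidable (Pre_split_title title) := by
  unfold Pre_split_title; infer_instance

def pvWitness_split_title : String := "Hello world"

def Spec_split_title (title : String) (out : List String) : Prop := out = split_title_alt title
instance (title : String) (out : List String) : Decidable (Spec_split_title title out) := by
  unfold Spec_split_title; infer_instance

-- ===== CLAIM (what is proved, stated in full; the proofs are below) =====
def Claim_equal_split_title : Prop :=
  ∀ (title : String), Dom_split_title title → Pre_split_title title →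
    Spec_split_title title (split_title title)

-- ===== LEMMAS AND PROOFS =====

-- A's loop, written as a recursion over the word list (same state as the fold)
def aLoop (m : Int) : List String → List String → Int → List Char → List String
  | [], acc, _, line => acc ++ [String.ofList line]
  | w :: ws, acc, r, line =>
      if r ≥ m then
        aLoop m ws (acc ++ [String.ofList line]) (PySem.Str.len w + 1) (w.toList ++ [' '])
      else aLoop m ws acc (r + PySem.Str.len w + 1) (line ++ w.toList ++ [' '])

lemma loopA_eq (m : Int) : ∀ (ws : List String) (acc : List String) (r : Int) (line : List Char),
    (split_title_loop m ws (acc, r, line)).1 ++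
      [String.ofList (split_title_loop m ws (acc, r, line)).2.2] = aLoop m ws acc r line := by
  intro ws
  induction ws with
  | nil => intro acc r line; simp [split_title_loop, aLoop]
  | cons w ws ih =>
      intro acc r line
      by_cases h : r ≥ m <;> simp [split_title_loop, aLoop, h, ih]

lemma first_line_len (m : Int) : ∀ (ws : List String) (total : Int),
    (first_line_alt m ws total).2.length ≤ ws.length := by
  intro ws
  induction ws with
  | nil => intro total; simp [first_line_alt]
  | cons w ws ih =>
      intro total
      by_cases h : total ≥ m
      · simp [first_line_alt, h]
      · simp only [first_line_alt, if_neg h]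
        exact le_trans (ih _) (Nat.le_succ _)

lemma aLoop_first_line (m : Int) (hm : 0 < m) :
    ∀ (ws : List String) (total : Int) (line : List Char) (acc : List String),
    aLoop m ws acc total line =
      if (first_line_alt m ws total).2.isEmpty then
        acc ++ [String.ofList (line ++ (first_line_alt m ws total).1)]
      else
        aLoop m (first_line_alt m ws total).2
          (acc ++ [String.ofList (line ++ (first_line_alt m ws total).1)]) 0 [] := by
  intro ws
  induction ws with
  | nil => intro total line acc; simp [first_line_alt, aLoop]
  | cons w ws ih =>
      intro total line acc
      by_cases h : total ≥ m
      · simp only [first_line_alt, if_pos h, List.isEmpty_cons, if_neg (by simp : ¬((false : Bool) = true))]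
        conv_lhs => rw [aLoop]
        conv_rhs => rw [aLoop]
        rw [if_pos h, if_neg (by omega : ¬(0 : Int) ≥ m)]
        simp
      · simp only [first_line_alt, if_neg h]
        conv_lhs => rw [aLoop]
        rw [if_neg h, ih]
        simp [List.append_assoc]

lemma aLoop_lines (m : Int) (hm : 0 < m) :
    ∀ (fuel : Nat) (ws : List String) (acc : List String), ws ≠ [] → ws.length ≤ fuel →
    aLoop m ws acc 0 [] = acc ++ lines_alt m fuel ws := by
  intro fuel
  induction fuel with
  | zero =>
      intro ws acc hne hlen
      cases ws with
      | nil => exact absurd rfl hne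
      | cons w ws => simp at hlen
  | succ n ih =>
      intro ws acc hne hlen
      rw [lines_alt, aLoop_first_line m hm]
      by_cases h : (first_line_alt m ws 0).2.isEmpty
      · simp [h]
      · rw [if_neg h, if_neg h]
        rw [ih _ _ (by simpa [List.isEmpty_iff] using h)]
        · simp
        · cases ws with
          | nil => exact absurd rfl hne
          | cons w ws =>
              have h0 : ¬(0 : Int) ≥ m := by omega
              simp only [first_line_alt, if_neg h0]
              have := first_line_len m ws (0 + PySem.Str.len w + 1)
              simp only [List.length_cons] at hlen
              omega

lemma splitOn_go_ne_nil (sep : List Char) :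
    ∀ (fuel : Nat) (l cur : List Char) (acc : List (List Char)),
    PySem.Chars.splitOn.go sep fuel l cur acc ≠ [] := by
  intro fuel
  induction fuel with
  | zero => intro l cur acc; simp [PySem.Chars.splitOn.go]
  | succ n ih =>
      intro l cur acc
      cases l with
      | nil => simp [PySem.Chars.splitOn.go]
      | cons c rest =>
          rw [PySem.Chars.splitOn.go]
          split_ifs <;> apply ih

lemma words_ne_nil (title : String) : (PySem.Str.split? title " ").getD [] ≠ [] := by
  simp [PySem.Str.split?, PySem.Chars.split?, PySem.Chars.splitOn]
  exact splitOn_go_ne_nil _ _ _ _ _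

lemma m_pos (title : String) (hpre : Pre_split_title title) :
    0 < (if PySem.Str.len title > 130 then
          PySem.Int.floordiv (42 * 18) (PySem.Int.floordiv (18 * 130) (PySem.Str.len title))
        else 42) := by
  unfold Pre_split_title at hpre
  set n := PySem.Str.len title with hn
  have hn0 : 0 ≤ n := by rw [hn, PySem.Str.len_eq]; positivity
  split_ifs with h
  · have h1 : (1 : Int) ≤ PySem.Int.floordiv (18 * 130) n := by
      rw [PySem.Int.le_floordiv_iff_mul_le (by omega)]; omega
    have h2 : PySem.Int.floordiv (18 * 130) n < 757 := by
      rw [PySem.Int.floordiv_lt_iff_lt_mul (by omega)]; omega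
    have h3 : (1 : Int) ≤ PySem.Int.floordiv (42 * 18) (PySem.Int.floordiv (18 * 130) n) := by
      rw [PySem.Int.le_floordiv_iff_mul_le (by omega)]; omega
    omega
  · omega

lemma line_length_eq (title : String) :
    get_line_length title =
      (if PySem.Str.len title > 130 then
        PySem.Int.floordiv (42 * 18) (PySem.Int.floordiv (18 * 130) (PySem.Str.len title))
      else 42) := by
  unfold get_line_length get_font_size
  split_ifs <;> rfl

-- ===== VERDICT (by name: the statement is the Claim_ definition above) =====
theorem split_title_spec : Claim_equal_split_title := by
  intro title _hdom hpre
  unfold Spec_split_title split_title split_title_alt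
  simp only [line_length_eq]
  rw [loopA_eq, aLoop_lines _ (m_pos title hpre) _ _ _ (words_ne_nil title) le_rfl]
  simp
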